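-- pv_equiv track=rewrite | github.com/jaumeollerfernandez/scrap.me | Scrapping - copia - copia/prueba2.0.py | extraerNombres
-- ===== SOURCE A (Python) =====
-- def extraerNombres(url):
--         empresa= ''
--         condicion=False
--         cont=0
--         i=0
--         while i < len(url):
--             if url[i] == '.' and cont ==0:
--                 condicion = True
--                 cont+=1
--                 i+=1
--             elif condicion and url[i]!='.' and cont==1:
--                 empresa+=url[i]
--                 i+=1
--             elif condicion and url[i] == '.' and cont==1:
--                 i=len(url)
--             else:
--                 i+=1
--         return empresa
-- ===== SOURCE B (Python) =====
-- def extraerNombres(url):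
--     first = url.find('.')
--     if first == -1:
--         return ''
--     second = url.find('.', first + 1)
--     if second == -1:
--         return url[first + 1:]
--     return url[first + 1:second]
-- ===== Notes on version B (the rewrite author's own statement) =====
-- stated objective: simpler
-- what changed: Replaces A's per-character while-loop state machine (condicion/cont flags, character-by-character accumulation) with two index searches via str.find and a single slice.
import Mathlib
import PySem

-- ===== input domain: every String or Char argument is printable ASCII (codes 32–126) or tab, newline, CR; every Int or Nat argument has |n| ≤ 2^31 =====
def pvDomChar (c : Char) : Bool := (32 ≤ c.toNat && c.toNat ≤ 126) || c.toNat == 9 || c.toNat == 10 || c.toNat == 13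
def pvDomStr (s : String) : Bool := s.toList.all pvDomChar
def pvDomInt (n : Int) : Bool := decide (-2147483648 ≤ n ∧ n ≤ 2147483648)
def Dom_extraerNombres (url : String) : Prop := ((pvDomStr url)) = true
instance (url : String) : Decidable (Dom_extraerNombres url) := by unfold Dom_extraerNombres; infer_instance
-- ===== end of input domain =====

-- B replaces A's per-character state machine by two index searches (find) and one slice; objective: simpler/idiomatic.

-- ===== PORT A =====
-- literal port of A's while-loop: state (empresa, condicion, cont), i advancing by one
-- except the break (i = len), which becomes returning the accumulator.
def pvLoopA : List Char → List Char → Bool → Int → List Char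
  | [], emp, _, _ => emp
  | c :: rest, emp, cond, cont =>
    if c = '.' ∧ cont = 0 then pvLoopA rest emp true (cont + 1)
    else if cond = true ∧ c ≠ '.' ∧ cont = 1 then pvLoopA rest (emp ++ [c]) cond cont
    else if cond = true ∧ c = '.' ∧ cont = 1 then emp
    else pvLoopA rest emp cond cont

def extraerNombres (url : String) : String :=
  String.ofList (pvLoopA url.toList [] false 0)

-- ===== PORT B =====
def extraerNombres_alt (url : String) : String :=
  let first := PySem.Str.find url "."
  if first = -1 then ""
  else
    let second := PySem.Str.findFrom url "." (first + 1)
    if second = -1 then PySem.Str.slice url (some (first + 1)) none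
    else PySem.Str.slice url (some (first + 1)) (some second)

-- ===== PRECONDITION & SPEC =====
def Spec_extraerNombres (url : String) (out : String) : Prop := out = extraerNombres_alt url
instance (url : String) (out : String) : Decidable (Spec_extraerNombres url out) := by unfold Spec_extraerNombres; infer_instance

-- ===== CLAIM (what is proved, stated in full; the proofs are below) =====
def Claim_equal_extraerNombres : Prop := ∀ (url : String), Dom_extraerNombres url → Spec_extraerNombres url (extraerNombres url)

-- ===== LEMMAS AND PROOFS =====

-- a singleton list is a prefix iff it is the head
lemma pv_singleton_prefix (c : Char) (w : List Char) : [c] <+: w ↔ w.head? = some c := by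
  cases w with
  | nil => simp
  | cons a t => simp [List.cons_prefix_cons, eq_comm]

-- membership gives a singleton infix
lemma pv_mem_infix {c : Char} {s : List Char} (h : c ∈ s) : [c] <:+: s := by
  obtain ⟨u, t, rfl⟩ := List.append_of_mem h
  exact ⟨u, t, by simp⟩

-- A's loop before the first dot: every non-dot char is skipped
lemma pvLoopA_phase1 (u : List Char) (v : List Char) (acc : List Char) (h : '.' ∉ u) :
    pvLoopA (u ++ '.' :: v) acc false 0 = pvLoopA v acc true 1 := by
  induction u with
  | nil => simp [pvLoopA]
  | cons a t ih =>
    have ha : ¬ a = '.' := fun hc => h (by simp [hc])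
    simp only [List.cons_append, pvLoopA, ha]
    simp only [false_and, if_false, false_and, and_false]
    exact ih (fun hm => h (List.mem_cons_of_mem _ hm))

-- A's loop on a string with no dot returns the accumulator unchanged
lemma pvLoopA_no_dot (s : List Char) (acc : List Char) (h : '.' ∉ s) :
    pvLoopA s acc false 0 = acc := by
  induction s with
  | nil => simp [pvLoopA]
  | cons a t ih =>
    have ha : ¬ a = '.' := fun hc => h (by simp [hc])
    simp only [pvLoopA, ha]
    simp only [false_and, if_false, and_false]
    exact ih (fun hm => h (List.mem_cons_of_mem _ hm))

-- A's loop after the first dot accumulates until the next dot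
lemma pvLoopA_phase2 (v : List Char) (acc : List Char) :
    pvLoopA v acc true 1 = acc ++ v.takeWhile (· ≠ '.') := by
  induction v generalizing acc with
  | nil => simp [pvLoopA]
  | cons a t ih =>
    by_cases ha : a = '.'
    · subst ha
      simp [pvLoopA]
    · simp [pvLoopA, ha, ih]

-- takeWhile (≠ '.') is take-to-the-first-dot
lemma pv_takeWhile_eq_take (v : List Char) (n : Nat)
    (hn : v[n]? = some '.') (hmin : ∀ i, i < n → v[i]? ≠ some '.') :
    v.takeWhile (· ≠ '.') = v.take n := by
  induction v generalizing n with
  | nil => simp at hn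
  | cons a t ih =>
    cases n with
    | zero =>
      simp at hn
      simp [hn]
    | succ m =>
      have ha : ¬ a = '.' := by
        have := hmin 0 (Nat.succ_pos m)
        simpa [eq_comm] using this
      simp only [List.takeWhile_cons, List.take_succ_cons]
      rw [if_pos (by simp [ha])]
      congr 1
      exact ih m (by simpa using hn) (fun i hi => by
        have := hmin (i + 1) (Nat.succ_lt_succ hi)
        simpa using this)

theorem extraerNombres_eq_alt (url : String) : extraerNombres url = extraerNombres_alt url := by
  have hdot : ("." : String).toList = ['.'] := rfl
  rw [← String.toList_inj]
  unfold extraerNombres extraerNombres_alt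
  simp only [PySem.Str.find_eq, PySem.Str.findFrom_eq, hdot]
  set s : List Char := url.toList with hs
  by_cases h1 : PySem.Chars.find s ['.'] = -1
  · -- no dot at all
    have hne : '.' ∉ s := by
      intro hm
      exact ((PySem.Chars.find_eq_neg_one_iff s ['.']).mp h1) (pv_mem_infix hm)
    simp [h1, pvLoopA_no_dot s [] hne]
  · -- there is a first dot at index n
    have h0 : 0 ≤ PySem.Chars.find s ['.'] := by
      have := PySem.Chars.neg_one_le_find s ['.']
      omega
    obtain ⟨hpre, hmin⟩ := PySem.Chars.find_spec h0
    set n : Nat := (PySem.Chars.find s ['.']).toNat with hn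
    have hfn : PySem.Chars.find s ['.'] = (n : Int) := (Int.toNat_of_nonneg h0).symm
    have hhead : (s.drop n).head? = some '.' := by
      rcases hpre with ⟨w, hw⟩
      rw [← hw]; rfl
    have hgetn : s[n]? = some '.' := by rw [← List.head?_drop]; exact hhead
    have hnlt : n < s.length := by
      by_contra hge
      exact absurd hgetn (by rw [List.getElem?_eq_none (by omega)]; simp)
    have hmin' : ∀ i, i < n → s[i]? ≠ some '.' := by
      intro i hi hc
      exact hmin i hi ((pv_singleton_prefix '.' (s.drop i)).mpr (by rw [List.head?_drop]; exact hc))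
    -- decompose s around the first dot
    have hsplit : s = s.take n ++ '.' :: s.drop (n + 1) := by
      conv_lhs => rw [← List.take_append_drop n s]
      rw [List.drop_eq_getElem_cons hnlt]
      have : s[n] = '.' := by
        have h' := List.getElem?_eq_getElem hnlt
        rw [h'] at hgetn
        exact Option.some.inj hgetn
      rw [this]
    have htake : '.' ∉ s.take n := by
      intro hm
      obtain ⟨j, hj, hje⟩ := List.getElem_of_mem hm
      have hjn : j < n := lt_of_lt_of_le hj (List.length_take_le n s)
      apply hmin' j hjn
      rw [List.getElem?_eq_getElem (lt_of_lt_of_le hjn (le_of_lt hnlt))]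
      rw [List.getElem_take] at hje
      rw [hje]
    -- A's side reduces to takeWhile after the first dot
    have hA : pvLoopA s [] false 0 = (s.drop (n + 1)).takeWhile (· ≠ '.') := by
      conv_lhs => rw [hsplit]
      rw [pvLoopA_phase1 _ _ _ htake, pvLoopA_phase2]
      simp
    set v : List Char := s.drop (n + 1) with hv
    -- B's side: findFrom at n+1
    have hk : n + 1 ≤ s.length := hnlt
    have hff : PySem.Chars.findFrom s ['.'] ((n : Int) + 1) none =
        if PySem.Chars.find v ['.'] = -1 then -1 else ((n + 1 : Nat) : Int) + PySem.Chars.find v ['.'] := by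
      have := PySem.Chars.findFrom_natCast s ['.'] (n + 1) hk
      rw [← this]
      norm_num
    rw [if_neg h1, hfn, hff]
    by_cases h2 : PySem.Chars.find v ['.'] = -1
    · -- no second dot: slice to the end, takeWhile keeps everything
      have hne2 : '.' ∉ v := by
        intro hm
        exact ((PySem.Chars.find_eq_neg_one_iff v ['.']).mp h2) (pv_mem_infix hm)
      rw [if_pos h2, if_pos rfl]
      simp only [PySem.Str.slice, String.toList_ofList, hA]
      have : v.takeWhile (· ≠ '.') = v := by
        rw [List.takeWhile_eq_self_iff]
        intro x hx
        simp only [decide_eq_true_eq, ne_eq]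
        intro hxe; exact hne2 (hxe ▸ hx)
      rw [this]
      have hnn : (0:Int) ≤ (n : Int) + 1 := by positivity
      show v = PySem.Chars.slice url.toList (some ((n:Int)+1)) none
      rw [← hs]
      show v = PySem.List.slice s (some ((n:Int)+1)) none
      rw [PySem.List.slice_from s hnn]
      simp [hv]
    · -- second dot found at n+1+g: slice, takeWhile stops there
      have hg0 : 0 ≤ PySem.Chars.find v ['.'] := by
        have := PySem.Chars.neg_one_le_find v ['.']
        omega
      set g : Nat := (PySem.Chars.find v ['.']).toNat with hgdef
      have hgv : PySem.Chars.find v ['.'] = (g : Int) := (Int.toNat_of_nonneg hg0).symm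
      obtain ⟨hpre2, hmin2⟩ := PySem.Chars.find_spec hg0
      have hhead2 : (v.drop g).head? = some '.' := by
        rcases hpre2 with ⟨w, hw⟩
        rw [← hw]; rfl
      have hget2 : v[g]? = some '.' := by rw [← List.head?_drop]; exact hhead2
      have hmin2' : ∀ i, i < g → v[i]? ≠ some '.' := by
        intro i hi hc
        exact hmin2 i hi ((pv_singleton_prefix '.' (v.drop i)).mpr (by rw [List.head?_drop]; exact hc))
      have hne : ¬ (((n + 1 : Nat) : Int) + PySem.Chars.find v ['.'] = -1) := by
        rw [hgv]; push_cast; omega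
      rw [if_neg h2, if_neg hne]
      simp only [PySem.Str.slice, String.toList_ofList, hA]
      rw [pv_takeWhile_eq_take v g hget2 hmin2']
      have hnn : (0:Int) ≤ (n : Int) + 1 := by positivity
      have hbn : (0:Int) ≤ ((n + 1 : Nat) : Int) + PySem.Chars.find v ['.'] := by
        rw [hgv]; push_cast; omega
      show v.take g = PySem.Chars.slice url.toList (some ((n:Int)+1)) (some (((n + 1 : Nat) : Int) + PySem.Chars.find v ['.']))
      rw [← hs]
      show v.take g = PySem.List.slice s (some ((n:Int)+1)) (some (((n + 1 : Nat) : Int) + PySem.Chars.find v ['.']))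
      rw [PySem.List.slice_toNat s hnn hbn, hgv]
      have e1 : (((n + 1 : Nat) : Int) + (g : Int)).toNat = n + 1 + g := by push_cast; omega
      have e2 : ((n : Int) + 1).toNat = n + 1 := by omega
      rw [e1, e2]
      have e3 : n + 1 + g - (n + 1) = g := by omega
      rw [e3, ← hv]


-- ===== VERDICT (by name: the statement is the Claim_ definition above) =====
theorem extraerNombres_spec : Claim_equal_extraerNombres := by
  intro url _
  unfold Spec_extraerNombres
  exact extraerNombres_eq_alt url
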